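-- pv_equiv track=rewrite | github.com/khaoss85/AI-Team-Orchestrator | backend/services/missing_deliverable_auto_completion.py | _find_missing_deliverables
-- ===== SOURCE A (Python) =====
-- from typing import Dict, Any, List, Optional, Tuple
--
-- def _find_missing_deliverables(existing: List[Dict[str, Any]], expected: List[str]) -> List[str]:
--     """Find which expected deliverables are missing"""
--     existing_titles = set()
--     for deliverable in existing:
--         title = deliverable.get('title', '').lower()
--         existing_titles.add(title)
--
--     missing = []
--     for expected_deliverable in expected:
--         # Check if this expected deliverable exists (fuzzy matching)
--         if not any(expected_deliverable.lower() in existing_title for existing_title in existing_titles):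
--             missing.append(expected_deliverable.replace('_', ' ').title())
--
--     return missing
-- ===== SOURCE B (Python) =====
-- def _find_missing_deliverables(existing, expected):
--     """Find which expected deliverables are missing (title-major scan with found flags)."""
--     queries = [q.lower() for q in expected]
--     found = [False] * len(queries)
--     seen = set()
--     for deliverable in existing:
--         title = deliverable.get('title', '').lower()
--         if title in seen:
--             continue
--         if all(found):
--             break
--         seen.add(title)
--         for i, q in enumerate(queries):
--             if not found[i] and q in title:
--                 found[i] = True
--     return [q.replace('_', ' ').title()
--             for q, f in zip(expected, found) if not f]
-- ===== Notes on version B (the rewrite author's own statement) =====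
-- stated objective: alternative
-- what changed: B swaps the loop nesting: instead of building a set of lowered titles and rescanning it per expected item (re-lowering the query each time), it lowers each query once and makes a single title-major pass, skipping already-seen titles, or-ing hits into a found-flags array and breaking once every query is found.
import Mathlib
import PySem

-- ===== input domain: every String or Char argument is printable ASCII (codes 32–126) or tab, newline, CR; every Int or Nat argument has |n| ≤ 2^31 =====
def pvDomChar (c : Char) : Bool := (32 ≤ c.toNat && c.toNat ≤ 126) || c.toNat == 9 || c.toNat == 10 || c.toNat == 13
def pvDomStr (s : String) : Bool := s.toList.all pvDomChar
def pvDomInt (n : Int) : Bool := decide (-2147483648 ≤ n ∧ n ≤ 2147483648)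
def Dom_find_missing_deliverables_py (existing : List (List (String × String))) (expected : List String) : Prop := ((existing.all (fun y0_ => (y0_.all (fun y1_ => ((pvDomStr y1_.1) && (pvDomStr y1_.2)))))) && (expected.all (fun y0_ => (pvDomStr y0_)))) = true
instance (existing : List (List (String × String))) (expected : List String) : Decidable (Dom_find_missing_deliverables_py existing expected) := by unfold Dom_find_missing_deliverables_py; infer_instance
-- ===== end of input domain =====

-- B swaps the loop nesting: instead of scanning the deduplicated title set once per expected
-- item, it makes one title-major pass (skipping already-seen titles, breaking once every query
-- is found) or-ing hits into a found-flags array (objective: alternative decomposition;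
-- return value identical on the whole domain).

-- ===== PORT A =====
-- hand port of Python str.title(), exact on ASCII (there only alphabetic chars are cased):
-- an alphabetic char is uppercased when the previous char is not alphabetic, else lowercased.
def pvTitleGo (prevAlpha : Bool) : List Char → List Char
  | [] => []
  | c :: rest =>
    (if PySem.Chars.isalpha c then
       (if prevAlpha then PySem.Chars.lowerChar c else PySem.Chars.upperChar c)
     else c) :: pvTitleGo (PySem.Chars.isalpha c) rest

def pvTitle (s : String) : String := String.ofList (pvTitleGo false s.toList)

def find_missing_deliverables_py (existing : List (List (String × String))) (expected : List String) : List String :=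
  let existing_titles : PySem.Set String :=
    existing.foldl
      (fun s d => s.add (PySem.Str.lower (PySem.Dict.getD ⟨d⟩ "title" "")))
      (PySem.Set.ofList [])
  expected.foldl
    (fun missing q =>
      if existing_titles.any (fun t => PySem.Str.isIn (PySem.Str.lower q) t) then missing
      else missing ++ [pvTitle (PySem.Str.replace q "_" " ")])
    []

-- ===== PORT B =====
-- the title-major scan: one pass over the deliverables, skipping already-seen titles and
-- stopping once every query has been found, or-ing hits into the found-flags list
def pvGoB (queries : List String) : List (List (String × String)) → PySem.Set String → List Bool → List Bool
  | [], _, found => found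
  | d :: tl, seen, found =>
    let title := PySem.Str.lower (PySem.Dict.getD ⟨d⟩ "title" "")
    if seen.contains title then pvGoB queries tl seen found
    else if found.all (fun f => f) then found
    else pvGoB queries tl (seen.add title)
      ((found.zip queries).map (fun p => p.1 || PySem.Str.isIn p.2 title))

def find_missing_deliverables_py_alt (existing : List (List (String × String))) (expected : List String) : List String :=
  let queries := expected.map (fun q => PySem.Str.lower q)
  let found : List Bool :=
    pvGoB queries existing (PySem.Set.ofList []) (List.replicate queries.length false)
  ((expected.zip found).filter (fun p => !p.2)).map
    (fun p => pvTitle (PySem.Str.replace p.1 "_" " "))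

-- ===== PRECONDITION & SPEC =====
def Spec_find_missing_deliverables_py (existing : List (List (String × String))) (expected : List String) (out : List String) : Prop := out = find_missing_deliverables_py_alt existing expected
instance (existing : List (List (String × String))) (expected : List String) (out : List String) : Decidable (Spec_find_missing_deliverables_py existing expected out) := by unfold Spec_find_missing_deliverables_py; infer_instance

-- ===== CLAIM (what is proved, stated in full; the proofs are below) =====
def Claim_equal_find_missing_deliverables_py : Prop := ∀ (existing : List (List (String × String))) (expected : List String), Dom_find_missing_deliverables_py existing expected → Spec_find_missing_deliverables_py existing expected (find_missing_deliverables_py existing expected)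

-- ===== LEMMAS AND PROOFS =====

-- the lowered title one deliverable contributes
def pvLowT (d : List (String × String)) : String :=
  PySem.Str.lower (PySem.Dict.getD ⟨d⟩ "title" "")

-- whether some existing deliverable's lowered title contains q.lower()
def pvHit (existing : List (List (String × String))) (q : String) : Bool :=
  existing.any (fun d => PySem.Str.isIn (PySem.Str.lower q) (pvLowT d))

-- A's set scan equals a scan of the raw deliverable list (duplicates do not change `any`)
lemma pvA_any (existing : List (List (String × String))) (q : String) :
    (existing.foldl
      (fun s d => s.add (PySem.Str.lower (PySem.Dict.getD ⟨d⟩ "title" "")))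
      (PySem.Set.ofList [])).any (fun t => PySem.Str.isIn (PySem.Str.lower q) t)
    = pvHit existing q := by
  rw [show (existing.foldl
      (fun s d => s.add (PySem.Str.lower (PySem.Dict.getD ⟨d⟩ "title" "")))
      (PySem.Set.ofList [])) =
      PySem.Set.update (PySem.Set.ofList []) (existing.map pvLowT) from
    (List.foldl_map (f := pvLowT) (g := PySem.Set.add) (init := PySem.Set.ofList [])).symm]
  rw [Bool.eq_iff_iff]
  simp [List.any_eq_true, PySem.Set.mem_update, pvHit, pvLowT]

-- B's flag loop computes, entry-wise over `expected`, 'already found or found in a scanned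
-- title'; the seen-skip and the all-found break do not change that value
lemma pvB_go (expected : List String) (tl : List (List (String × String)))
    (seen : PySem.Set String) (g : String → Bool)
    (hseen : ∀ t ∈ seen, ∀ q ∈ expected,
      PySem.Str.isIn (PySem.Str.lower q) t = true → g q = true) :
    pvGoB (expected.map (fun q => PySem.Str.lower q)) tl seen (expected.map g)
    = expected.map (fun q => g q || pvHit tl q) := by
  induction tl generalizing seen g with
  | nil => simp [pvGoB, pvHit]
  | cons d tl ih =>
    rw [pvGoB]
    by_cases hc : seen.contains (PySem.Str.lower (PySem.Dict.getD ⟨d⟩ "title" "")) = true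
    · rw [if_pos hc, ih seen g hseen]
      apply List.map_congr_left
      intro q hq
      have habs := hseen _ (List.mem_of_elem_eq_true hc) q hq
      by_cases hi : PySem.Str.isIn (PySem.Str.lower q) (pvLowT d) = true
      · simp [pvHit, pvLowT, habs (by simpa [pvLowT] using hi)]
      · simp [pvHit, pvLowT] at hi ⊢
        simp [hi]
    · rw [if_neg hc]
      by_cases hall : ((expected.map g).all (fun f => f)) = true
      · rw [if_pos hall]
        have hg : ∀ q ∈ expected, g q = true := by
          intro q hq
          exact (List.all_eq_true.mp hall) _ (List.mem_map_of_mem hq)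
        apply (List.map_congr_left ?_).symm
        intro q hq
        simp [hg q hq]
      · rw [if_neg hall, List.zip_map', List.map_map, ih]
        · apply List.map_congr_left
          intro q _
          simp [pvHit, pvLowT, Bool.or_assoc, Function.comp]
        · intro t ht q hq hi
          rcases (PySem.Set.mem_add seen _ t).mp ht with h | h
          · simp only [Function.comp_apply, Bool.or_eq_true]
            exact Or.inl (hseen t h q hq hi)
          · subst h
            simp only [Function.comp_apply, Bool.or_eq_true]
            exact Or.inr (by simpa using hi)

-- zip-with-flags filtering equals filtering by the flag function
lemma pvZipFilter (c : String → Bool) (l : List String) :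
    ((l.zip (l.map c)).filter (fun p => !p.2)).map
      (fun p => pvTitle (PySem.Str.replace p.1 "_" " "))
    = (l.filter (fun q => !c q)).map (fun q => pvTitle (PySem.Str.replace q "_" " ")) := by
  induction l with
  | nil => rfl
  | cons q tl ih =>
    by_cases h : c q <;> simp [h, ih]

-- ===== VERDICT (by name: the statement is the Claim_ definition above) =====
theorem find_missing_deliverables_py_spec : Claim_equal_find_missing_deliverables_py := by
  intro existing expected _
  unfold Spec_find_missing_deliverables_py
  unfold find_missing_deliverables_py find_missing_deliverables_py_alt
  simp only []  -- zeta-reduce the let-bindings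
  rw [show (fun (missing : List String) q =>
      if (existing.foldl
        (fun s d => s.add (PySem.Str.lower (PySem.Dict.getD ⟨d⟩ "title" "")))
        (PySem.Set.ofList [])).any (fun t => PySem.Str.isIn (PySem.Str.lower q) t)
      then missing else missing ++ [pvTitle (PySem.Str.replace q "_" " ")])
    = (fun missing q => if (!pvHit existing q) = true
        then missing ++ [pvTitle (PySem.Str.replace q "_" " ")] else missing) from by
      funext missing q
      rw [pvA_any]
      by_cases h : pvHit existing q <;> simp [h]]
  rw [PySem.List.foldl_append_if]
  rw [show List.replicate (expected.map (fun q => PySem.Str.lower q)).length false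
      = expected.map (fun _ => false) from by simp [List.map_const']]
  rw [pvB_go expected existing (PySem.Set.ofList []) (fun _ => false)
      (by intro t ht; simp at ht)]
  simp only [Bool.false_or]
  rw [pvZipFilter]
  simp
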